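-- pv_equiv track=rewrite | github.com/lacoco-lab/always_a_transformer | people_names/create_dataset.py | iter_person_spans
-- ===== SOURCE A (Python) =====
-- from typing import Iterator, List, Tuple
--
-- def iter_person_spans(labels: List[str]) -> Iterator[Tuple[int, int]]:
--     """
--     Yield (start_idx, end_idx) token indices for contiguous PERSON spans in a
--     label sequence (IOB2).  *end_idx* is exclusive.
--     """
--     i = 0
--     n = len(labels)
--     while i < n:
--         if labels[i] == "B-Person" or labels[i] == "B-PER" or labels[i] == "B-PERSON":
--             start = i
--             i += 1
--             while i < n and labels[i].startswith("I-"):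
--                 i += 1
--             yield start, i
--         else:
--             i += 1
-- ===== SOURCE B (Python) =====
-- def iter_person_spans(labels):
--     """
--     Yield (start_idx, end_idx) token indices for contiguous PERSON spans in a
--     label sequence (IOB2).  *end_idx* is exclusive.
--     """
--     n = len(labels)
--     # nb[j] = smallest index k >= j whose label does not start with "I-", or n.
--     nb = [n] * (n + 1)
--     for j in range(n - 1, -1, -1):
--         nb[j] = j if not labels[j].startswith("I-") else nb[j + 1]
--     for i, lab in enumerate(labels):
--         if lab in ("B-Person", "B-PER", "B-PERSON"):
--             yield i, nb[i + 1]
-- ===== Notes on version B (the rewrite author's own statement) =====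
-- stated objective: alternative
-- what changed: Replaced the nested index-advancing while-loops by two independent passes: a backward pass precomputing, for every position, the next non-'I-' boundary index, then a forward enumerate pass that emits (i, nb[i+1]) for each B-Person label.
import Mathlib
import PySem

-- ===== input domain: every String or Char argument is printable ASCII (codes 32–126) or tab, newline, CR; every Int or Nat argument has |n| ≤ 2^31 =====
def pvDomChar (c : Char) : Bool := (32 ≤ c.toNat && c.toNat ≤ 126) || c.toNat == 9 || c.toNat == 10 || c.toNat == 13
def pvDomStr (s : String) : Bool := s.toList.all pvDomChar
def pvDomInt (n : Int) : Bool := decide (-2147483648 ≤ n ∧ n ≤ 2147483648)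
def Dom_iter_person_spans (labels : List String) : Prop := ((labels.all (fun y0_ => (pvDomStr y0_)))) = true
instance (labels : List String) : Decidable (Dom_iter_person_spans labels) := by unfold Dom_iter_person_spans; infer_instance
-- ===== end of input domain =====

-- B replaces A's nested index-advancing while-loops by a backward next-boundary precomputation plus a flat enumerate pass (alternative decomposition, same O(n) cost); return-value equivalence only (A is a generator).

-- ===== PORT A =====
-- inner 'while i < n and labels[i].startswith("I-"): i += 1', returning the final i
def pvSkipI (labels : List String) (i : Nat) : Nat :=
  if h : i < labels.length ∧ PySem.Str.startswith (labels.getD i "") "I-" = true then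
    pvSkipI labels (i + 1)
  else i
termination_by labels.length - i
decreasing_by omega

theorem pvSkipI_ge (labels : List String) (i : Nat) : i ≤ pvSkipI labels i := by
  have key : ∀ k i, labels.length - i ≤ k → i ≤ pvSkipI labels i := by
    intro k
    induction k with
    | zero =>
      intro i hi
      rw [pvSkipI]
      split
      · rename_i h; omega
      · exact Nat.le_refl i
    | succ k ih =>
      intro i hi
      rw [pvSkipI]
      split
      · rename_i h
        exact Nat.le_trans (Nat.le_succ i) (ih (i + 1) (by omega))
      · exact Nat.le_refl i
  exact key (labels.length - i) i (Nat.le_refl _)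

-- outer 'while i < n' loop of A
def pvLoopA (labels : List String) (i : Nat) : List (Int × Int) :=
  if h : i < labels.length then
    if (labels.getD i "") == "B-Person" || (labels.getD i "") == "B-PER" || (labels.getD i "") == "B-PERSON" then
      ((i : Int), (pvSkipI labels (i + 1) : Int)) :: pvLoopA labels (pvSkipI labels (i + 1))
    else pvLoopA labels (i + 1)
  else []
termination_by labels.length - i
decreasing_by
  · have := pvSkipI_ge labels (i + 1); omega
  · omega

def iter_person_spans (labels : List String) : List (Int × Int) :=
  pvLoopA labels 0

-- ===== PORT B =====
-- backward fill: pvNbFrom labels j = [nb[j], nb[j+1], …, nb[n]]  (nb[j] = j if labels[j] is a boundary else nb[j+1]; nb[n] = n)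
def pvNbFrom (labels : List String) (j : Nat) : List Nat :=
  if h : j < labels.length then
    (if PySem.Str.startswith (labels.getD j "") "I-" = true then
      (pvNbFrom labels (j + 1)).headD labels.length else j) :: pvNbFrom labels (j + 1)
  else [labels.length]
termination_by labels.length - j
decreasing_by omega

def iter_person_spans_alt (labels : List String) : List (Int × Int) :=
  let n := labels.length
  let nb := pvNbFrom labels 0
  (PySem.List.enumerate labels 0).foldl
    (fun acc p =>
      if p.2 == "B-Person" || p.2 == "B-PER" || p.2 == "B-PERSON" then
        acc ++ [(p.1, ((nb.getD (p.1.toNat + 1) n : Nat) : Int))]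
      else acc) []

-- ===== PRECONDITION & SPEC =====
def Spec_iter_person_spans (labels : List String) (out : List (Int × Int)) : Prop := out = iter_person_spans_alt labels
instance (labels : List String) (out : List (Int × Int)) : Decidable (Spec_iter_person_spans labels out) := by unfold Spec_iter_person_spans; infer_instance

-- ===== CLAIM (what is proved, stated in full; the proofs are below) =====
def Claim_equal_iter_person_spans : Prop := ∀ (labels : List String), Dom_iter_person_spans labels → Spec_iter_person_spans labels (iter_person_spans labels)

-- ===== LEMMAS AND PROOFS =====
-- reference shape both ports are reduced to: one span (i, skipI (i+1)) per B-label position i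
def pvSpansFrom (labels : List String) (i : Nat) : List (Int × Int) :=
  if i < labels.length then
    (if (labels.getD i "") == "B-Person" || (labels.getD i "") == "B-PER" || (labels.getD i "") == "B-PERSON" then
      [((i : Int), (pvSkipI labels (i + 1) : Int))] else [])
    ++ pvSpansFrom labels (i + 1)
  else []
termination_by labels.length - i
decreasing_by omega

theorem headD_eq_getD {α : Type} (l : List α) (d : α) : l.headD d = l.getD 0 d := by
  cases l <;> rfl

theorem pvSkipI_between (labels : List String) :
    ∀ k i p, labels.length - i ≤ k → i ≤ p → p < pvSkipI labels i →
      PySem.Str.startswith (labels.getD p "") "I-" = true := by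
  intro k
  induction k with
  | zero =>
    intro i p hk hip hlt
    rw [pvSkipI] at hlt
    split at hlt
    · rename_i h; omega
    · omega
  | succ k ih =>
    intro i p hk hip hlt
    rw [pvSkipI] at hlt
    split at hlt
    · rename_i h
      by_cases hpi : p = i
      · subst hpi; exact h.2
      · exact ih (i + 1) p (by omega) (by omega) hlt
    · omega

theorem pv_isB_not_I (s : String) :
    ((s == "B-Person" || s == "B-PER" || s == "B-PERSON") = true) →
    PySem.Str.startswith s "I-" = false := by
  intro h
  simp only [Bool.or_eq_true, beq_iff_eq] at h
  rcases h with (h | h) | h <;> subst h <;> decide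

theorem pvSpansFrom_congr (labels : List String) :
    ∀ k i j, j - i ≤ k → i ≤ j →
      (∀ p, i ≤ p → p < j →
        ((labels.getD p "") == "B-Person" || (labels.getD p "") == "B-PER" || (labels.getD p "") == "B-PERSON") = false) →
      pvSpansFrom labels i = pvSpansFrom labels j := by
  intro k
  induction k with
  | zero =>
    intro i j hk hij _
    have : i = j := by omega
    simp [this]
  | succ k ih =>
    intro i j hk hij hno
    by_cases hij' : i = j
    · simp [hij']
    · have hlt : i < j := by omega
      rw [pvSpansFrom]
      by_cases hin : i < labels.length
      · simp only [hin, if_true, hno i (Nat.le_refl i) hlt, if_false, List.nil_append]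
        exact ih (i + 1) j (by omega) (by omega) (fun p hp1 hp2 => hno p (by omega) hp2)
      · have hjn : ¬ j < labels.length := by omega
        have e2 : pvSpansFrom labels j = [] := by rw [pvSpansFrom]; simp [hjn]
        rw [if_neg hin, e2]
  
theorem pvLoopA_eq_spansFrom (labels : List String) :
    ∀ k i, labels.length - i ≤ k → pvLoopA labels i = pvSpansFrom labels i := by
  intro k
  induction k with
  | zero =>
    intro i hk
    rw [pvLoopA, pvSpansFrom]
    have : ¬ i < labels.length := by omega
    simp [this]
  | succ k ih =>
    intro i hk
    rw [pvLoopA, pvSpansFrom]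
    by_cases hin : i < labels.length
    · simp only [hin, dif_pos, if_pos]
      by_cases hB : ((labels.getD i "") == "B-Person" || (labels.getD i "") == "B-PER" || (labels.getD i "") == "B-PERSON") = true
      · have hge := pvSkipI_ge labels (i + 1)
        rw [if_pos hB, if_pos hB]
        have h1 : pvLoopA labels (pvSkipI labels (i + 1)) = pvSpansFrom labels (pvSkipI labels (i + 1)) :=
          ih _ (by omega)
        have h2 : pvSpansFrom labels (i + 1) = pvSpansFrom labels (pvSkipI labels (i + 1)) := by
          apply pvSpansFrom_congr labels (pvSkipI labels (i + 1) - (i + 1)) _ _ (Nat.le_refl _) hge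
          intro p hp1 hp2
          have hI := pvSkipI_between labels (labels.length - (i + 1)) (i + 1) p (Nat.le_refl _) hp1 hp2
          by_contra hcon
          simp only [Bool.not_eq_false] at hcon
          rw [pv_isB_not_I _ hcon] at hI
          exact Bool.false_ne_true hI
        rw [h1, ← h2]
        simp
      · simp only [Bool.not_eq_true] at hB
        rw [if_neg (by rw [hB]; exact Bool.false_ne_true),
            if_neg (by rw [hB]; exact Bool.false_ne_true)]
        simp only [List.nil_append]
        exact ih (i + 1) (by omega)
    · simp [hin]

-- nb[j+k] = pvSkipI labels (j+k)
theorem pvNb_getD (labels : List String) :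
    ∀ m j k, labels.length - j ≤ m → j + k ≤ labels.length →
      (pvNbFrom labels j).getD k labels.length = pvSkipI labels (j + k) := by
  intro m
  induction m with
  | zero =>
    intro j k hm hjk
    have hj : ¬ j < labels.length := by omega
    have hk : k = 0 := by omega
    subst hk
    rw [Nat.add_zero, pvNbFrom, dif_neg hj, pvSkipI,
        dif_neg (show ¬(j < labels.length ∧ PySem.Str.startswith (labels.getD j "") "I-" = true)
          from fun hc => hj hc.1)]
    simp only [List.getD_cons_zero]
    omega
  | succ m ih =>
    intro j k hm hjk
    by_cases hj : j < labels.length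
    · rw [pvNbFrom, dif_pos hj]
      cases k with
      | zero =>
        simp only [Nat.add_zero, List.getD_cons_zero]
        rw [pvSkipI]
        by_cases hI : PySem.Str.startswith (labels.getD j "") "I-" = true
        · rw [if_pos hI, dif_pos ⟨hj, hI⟩, headD_eq_getD]
          have h := ih (j + 1) 0 (by omega) (by omega)
          simpa using h
        · rw [if_neg hI,
              dif_neg (show ¬(j < labels.length ∧ PySem.Str.startswith (labels.getD j "") "I-" = true)
                from fun hc => hI hc.2)]
      | succ k' =>
        rw [List.getD_cons_succ]
        have h := ih (j + 1) k' (by omega) (by omega)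
        rw [h]
        congr 1
        omega
    · have hk : k = 0 := by omega
      subst hk
      rw [Nat.add_zero, pvNbFrom, dif_neg hj, pvSkipI,
          dif_neg (show ¬(j < labels.length ∧ PySem.Str.startswith (labels.getD j "") "I-" = true)
            from fun hc => hj hc.1)]
      simp only [List.getD_cons_zero]
      omega

theorem pvEnum_filter_map (labels : List String) :
    ∀ m i, labels.length - i ≤ m → i ≤ labels.length →
      ((PySem.List.enumerate (labels.drop i) (i : Int)).filter
          (fun p => p.2 == "B-Person" || p.2 == "B-PER" || p.2 == "B-PERSON")).map
        (fun p => (p.1, (pvSkipI labels (p.1.toNat + 1) : Int)))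
      = pvSpansFrom labels i := by
  intro m
  induction m with
  | zero =>
    intro i hm hi
    have : i = labels.length := by omega
    subst this
    rw [pvSpansFrom]
    simp [List.drop_length, PySem.List.enumerate]
  | succ m ih =>
    intro i hm hi
    by_cases hin : i < labels.length
    · rw [List.drop_eq_getElem_cons hin, PySem.List.enumerate_cons]
      rw [pvSpansFrom]
      simp only [hin, if_pos]
      have harr : ((i : Int) + 1) = ((i + 1 : Nat) : Int) := by push_cast; ring
      rw [List.filter_cons]
      by_cases hB : ((labels[i] : String) == "B-Person" || (labels[i] : String) == "B-PER" || (labels[i] : String) == "B-PERSON") = true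
      · have hgd : labels.getD i "" = labels[i] := List.getD_eq_getElem labels "" hin
        rw [if_pos (by simpa using hB)]
        rw [List.map_cons]
        rw [harr, ih (i + 1) (by omega) (by omega)]
        rw [if_pos (by rw [hgd]; exact hB)]
        simp [Int.toNat_natCast]
      · have hgd : labels.getD i "" = labels[i] := List.getD_eq_getElem labels "" hin
        rw [if_neg (by simpa using hB)]
        rw [harr, ih (i + 1) (by omega) (by omega)]
        rw [if_neg (by rw [hgd]; exact hB)]
        simp
    · have : i = labels.length := by omega
      subst this
      rw [pvSpansFrom]
      simp [List.drop_length, PySem.List.enumerate]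

theorem pvAlt_eq_spansFrom (labels : List String) :
    iter_person_spans_alt labels = pvSpansFrom labels 0 := by
  have hcongr : ∀ (acc : List (Int × Int)), ∀ p ∈ PySem.List.enumerate labels 0,
      (fun (acc : List (Int × Int)) (p : Int × String) =>
        if p.2 == "B-Person" || p.2 == "B-PER" || p.2 == "B-PERSON" then
          acc ++ [(p.1, (((pvNbFrom labels 0).getD (p.1.toNat + 1) labels.length : Nat) : Int))]
        else acc) acc p
      = (fun (acc : List (Int × Int)) (p : Int × String) =>
        if p.2 == "B-Person" || p.2 == "B-PER" || p.2 == "B-PERSON" then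
          acc ++ [(p.1, (pvSkipI labels (p.1.toNat + 1) : Int))]
        else acc) acc p := by
    intro acc p hp
    rcases (PySem.List.mem_enumerate_iff labels 0 p).1 hp with ⟨k, hk, rfl⟩
    have hnb := pvNb_getD labels labels.length 0 (k + 1) (by omega) (by omega)
    simp only [Nat.zero_add] at hnb
    simp only [Int.zero_add, Int.toNat_natCast]
    rw [hnb]
  simp only [iter_person_spans_alt]
  rw [PySem.List.foldl_congr_mem _ _ _ _ hcongr]
  rw [PySem.List.foldl_append_if
    (fun (p : Int × String) => p.2 == "B-Person" || p.2 == "B-PER" || p.2 == "B-PERSON")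
    (fun (p : Int × String) => (p.1, (pvSkipI labels (p.1.toNat + 1) : Int)))]
  have h := pvEnum_filter_map labels labels.length 0 (by omega) (by omega)
  simpa using h

-- ===== VERDICT (by name: the statement is the Claim_ definition above) =====
theorem iter_person_spans_spec : Claim_equal_iter_person_spans := by
  intro labels _
  unfold Spec_iter_person_spans iter_person_spans
  rw [pvAlt_eq_spansFrom, pvLoopA_eq_spansFrom labels labels.length 0 (by omega)]
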